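-- pv_equiv track=rewrite | github.com/csgear/competitive | usaco/chapter2/frac1.py | generate_fractions
-- ===== SOURCE A (Python) =====
-- import math
--
-- def generate_fractions(N):
--     fractions = set()
--     for d in range(2, N + 1):
--         for n in range(1, d):
--             # Reduce the fraction to its simplest form
--             gcd = math.gcd(n, d)
--             simplified_n = n // gcd
--             simplified_d = d // gcd
--             fractions.add((simplified_n, simplified_d))
--     return fractions
-- ===== SOURCE B (Python) =====
-- import math
--
-- def generate_fractions(N):
--     # each reduced proper fraction n/d (gcd(n,d)=1, 0<n<d<=N) is produced exactly once:
--     # no reduction divisions, no duplicate insertions to deduplicate.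
--     return {(n, d) for d in range(2, N + 1) for n in range(1, d) if math.gcd(n, d) == 1}
-- ===== Notes on version B (the rewrite author's own statement) =====
-- stated objective: alternative
-- what changed: A generates every numerator/denominator pair, reduces each with a gcd plus divisions and deduplicates the results through a set; B keeps only the coprime pairs, so each reduced fraction is produced exactly once with no reduction divisions and no duplicate set insertions.
import Mathlib
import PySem

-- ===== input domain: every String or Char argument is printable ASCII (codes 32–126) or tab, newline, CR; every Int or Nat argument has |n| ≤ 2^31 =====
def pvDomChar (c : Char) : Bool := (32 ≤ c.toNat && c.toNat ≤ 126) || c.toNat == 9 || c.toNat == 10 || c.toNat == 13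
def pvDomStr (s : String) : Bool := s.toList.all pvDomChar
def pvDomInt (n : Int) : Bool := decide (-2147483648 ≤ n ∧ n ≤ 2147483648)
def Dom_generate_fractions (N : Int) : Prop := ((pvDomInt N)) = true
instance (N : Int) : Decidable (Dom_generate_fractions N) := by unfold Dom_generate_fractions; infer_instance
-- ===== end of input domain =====

-- B enumerates each reduced proper fraction exactly once as a coprime pair, dropping A's
-- per-pair reduction divisions and set deduplication.

-- ===== PORT A =====
def generate_fractions (N : Int) : List (List Int) :=
  (PySem.List.pyRange 2 (N + 1) 1).foldl
    (fun fractions d =>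
      (PySem.List.pyRange 1 d 1).foldl
        (fun fractions n =>
          let gcd : Int := (Int.gcd n d : Int)
          let simplified_n : Int := PySem.Int.floordiv n gcd
          let simplified_d : Int := PySem.Int.floordiv d gcd
          PySem.Set.add fractions [simplified_n, simplified_d])
        fractions)
    PySem.Set.empty

-- ===== PORT B =====
def generate_fractions_alt (N : Int) : List (List Int) :=
  PySem.Set.ofList
    ((PySem.List.pyRange 2 (N + 1) 1).flatMap (fun d =>
      ((PySem.List.pyRange 1 d 1).filter (fun n => Int.gcd n d == 1)).map (fun n => [n, d])))

-- ===== PRECONDITION & SPEC =====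
def Spec_generate_fractions (N : Int) (out : List (List Int)) : Prop := out = generate_fractions_alt N
instance (N : Int) (out : List (List Int)) : Decidable (Spec_generate_fractions N out) := by unfold Spec_generate_fractions; infer_instance

-- ===== CLAIM (what is proved, stated in full; the proofs are below) =====
def Claim_equal_generate_fractions : Prop := ∀ (N : Int), Dom_generate_fractions N → Spec_generate_fractions N (generate_fractions N)

-- ===== LEMMAS AND PROOFS =====

/-- The block of reduced fractions with denominator `d`, numerators `1 ≤ n < j`. -/
def pvPart (d j : Int) : List (List Int) :=
  ((PySem.List.pyRange 1 j 1).filter (fun n => Int.gcd n d == 1)).map (fun n => [n, d])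

lemma pvPart_mem {d j : Int} {x : List Int} :
    x ∈ pvPart d j ↔ ∃ n : Int, 1 ≤ n ∧ n < j ∧ Int.gcd n d = 1 ∧ x = [n, d] := by
  simp only [pvPart, List.mem_map, List.mem_filter, PySem.List.mem_pyRange_one, beq_iff_eq]
  constructor
  · rintro ⟨n, ⟨⟨h1, h2⟩, h3⟩, rfl⟩
    exact ⟨n, h1, h2, h3, rfl⟩
  · rintro ⟨n, h1, h2, h3, rfl⟩
    exact ⟨n, ⟨⟨h1, h2⟩, h3⟩, rfl⟩

/-- The flattened blocks for all denominators `2 ≤ b < d`. -/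
def pvFlat (d : Int) : List (List Int) :=
  (PySem.List.pyRange 2 d 1).flatMap (fun b => pvPart b b)

lemma pvFlat_mem {d : Int} {x : List Int} :
    x ∈ pvFlat d ↔ ∃ a b : Int, 1 ≤ a ∧ a < b ∧ b < d ∧ Int.gcd a b = 1 ∧ x = [a, b] := by
  simp only [pvFlat, List.mem_flatMap, PySem.List.mem_pyRange_one]
  constructor
  · rintro ⟨b, ⟨hb2, hbd⟩, hx⟩
    rcases pvPart_mem.mp hx with ⟨n, h1, h2, h3, rfl⟩
    exact ⟨n, b, h1, h2, hbd, h3, rfl⟩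
  · rintro ⟨a, b, h1, h2, h3, h4, rfl⟩
    exact ⟨b, ⟨by omega, h3⟩, pvPart_mem.mpr ⟨a, h1, h2, h4, rfl⟩⟩

/-- One step of A's inner loop. -/
def pvStep (d : Int) (s : List (List Int)) (n : Int) : List (List Int) :=
  PySem.Set.add s [PySem.Int.floordiv n (Int.gcd n d : Int),
                   PySem.Int.floordiv d (Int.gcd n d : Int)]

lemma pvInner (d : Int) (hd : 2 ≤ d) :
    ∀ (k : Nat) (j : Int), 1 ≤ j → j ≤ d → d - j = (k : Int) →
      (PySem.List.pyRange j d 1).foldl (pvStep d) (pvFlat d ++ pvPart d j) =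
        pvFlat d ++ pvPart d d := by
  intro k
  induction k with
  | zero =>
    intro j hj hjd hk
    have : j = d := by omega
    subst this
    rw [PySem.List.pyRange_one_eq_nil (by omega), List.foldl_nil]
  | succ k ih =>
    intro j hj hjd hk
    have hjd' : j < d := by omega
    rw [PySem.List.pyRange_one_cons hjd', List.foldl_cons]
    have hnext : pvStep d (pvFlat d ++ pvPart d j) j = pvFlat d ++ pvPart d (j + 1) := by
      by_cases hg : Int.gcd j d = 1
      · -- coprime: a genuinely new element is appended
        have hdiv1 : PySem.Int.floordiv j ((Int.gcd j d : Nat) : Int) = j := by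
          rw [hg]; rw [PySem.Int.floordiv_eq_ediv_of_pos (by norm_num)]; simp
        have hdiv2 : PySem.Int.floordiv d ((Int.gcd j d : Nat) : Int) = d := by
          rw [hg]; rw [PySem.Int.floordiv_eq_ediv_of_pos (by norm_num)]; simp
        have hnotmem : [j, d] ∉ pvFlat d ++ pvPart d j := by
          intro hmem
          rcases List.mem_append.mp hmem with h | h
          · rcases pvFlat_mem.mp h with ⟨a, b, _, _, hbd, _, hx⟩
            simp only [List.cons.injEq, and_true] at hx
            omega
          · rcases pvPart_mem.mp h with ⟨n, _, hnj, _, hx⟩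
            simp only [List.cons.injEq, and_true] at hx
            omega
        have hpart : pvPart d (j + 1) = pvPart d j ++ [[j, d]] := by
          unfold pvPart
          rw [PySem.List.pyRange_one_succ_right hj, List.filter_append, List.map_append]
          simp [hg]
        rw [pvStep, hdiv1, hdiv2, PySem.Set.add_of_not_mem hnotmem, hpart, List.append_assoc]
      · -- not coprime: the reduced pair already occurred at a smaller denominator
        have hgpos : 0 < Int.gcd j d := Int.gcd_pos_of_ne_zero_left d (by omega)
        have hdvd := Int.gcd_div_gcd_div_gcd (i := j) (j := d) hgpos
        set g : Int := ((Int.gcd j d : Nat) : Int) with hgdef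
        have hg2 : 2 ≤ g := by omega
        obtain ⟨a, ha⟩ : g ∣ j := Int.gcd_dvd_left j d
        obtain ⟨b, hb⟩ : g ∣ d := Int.gcd_dvd_right j d
        have hga' : j / g = a := by
          rw [ha]; exact Int.mul_ediv_cancel_left _ (by omega)
        have hgb' : d / g = b := by
          rw [hb]; exact Int.mul_ediv_cancel_left _ (by omega)
        have hga : PySem.Int.floordiv j g = a := by
          rw [PySem.Int.floordiv_eq_ediv_of_pos (by omega)]; exact hga'
        have hgb : PySem.Int.floordiv d g = b := by
          rw [PySem.Int.floordiv_eq_ediv_of_pos (by omega)]; exact hgb'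
        have ha1 : 1 ≤ a := by
          by_contra h
          have h2 : g * a ≤ 0 :=
            mul_nonpos_of_nonneg_of_nonpos (by omega) (by omega)
          have hj' : (1 : Int) ≤ g * a := by rw [← ha]; exact hj
          linarith
        have hab : a < b := by
          have h : g * a < g * b := by rw [← ha, ← hb]; exact hjd'
          exact lt_of_mul_lt_mul_left h (by omega)
        have hbd : b < d := by
          rw [hb]; nlinarith
        have hcop : Int.gcd a b = 1 := by
          rwa [hga', hgb'] at hdvd
        have hmem : [a, b] ∈ pvFlat d ++ pvPart d j :=
          List.mem_append.mpr (Or.inl (pvFlat_mem.mpr ⟨a, b, ha1, hab, hbd, hcop, rfl⟩))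
        have hpart : pvPart d (j + 1) = pvPart d j := by
          unfold pvPart
          rw [PySem.List.pyRange_one_succ_right hj, List.filter_append, List.map_append]
          simp [hg]
        rw [pvStep, ← hgdef, hga, hgb, PySem.Set.add_of_mem hmem, hpart]
    rw [hnext]
    exact ih (j + 1) (by omega) (by omega) (by omega)

lemma pvMain (K : Nat) :
    (PySem.List.pyRange 2 (2 + (K : Int)) 1).foldl
      (fun fractions d => (PySem.List.pyRange 1 d 1).foldl (pvStep d) fractions)
      PySem.Set.empty = pvFlat (2 + (K : Int)) := by
  induction K with
  | zero => decide
  | succ K ih =>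
    have h2 : (2 : Int) ≤ 2 + (K : Int) := by omega
    rw [show ((2 : Int) + ((K + 1 : Nat) : Int)) = (2 + (K : Int)) + 1 by push_cast; ring]
    rw [PySem.List.pyRange_one_succ_right h2, List.foldl_append, ih, List.foldl_cons,
        List.foldl_nil]
    have hpart0 : pvPart (2 + (K : Int)) 1 = [] := by
      unfold pvPart
      rw [PySem.List.pyRange_one_eq_nil (by omega)]
      rfl
    have hflat : pvFlat (2 + (K : Int)) ++ pvPart (2 + (K : Int)) (2 + (K : Int)) =
        pvFlat ((2 + (K : Int)) + 1) := by
      unfold pvFlat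
      rw [PySem.List.pyRange_one_succ_right h2, List.flatMap_append]
      simp
    calc (PySem.List.pyRange 1 (2 + (K : Int)) 1).foldl (pvStep (2 + (K : Int)))
          (pvFlat (2 + (K : Int)))
        = (PySem.List.pyRange 1 (2 + (K : Int)) 1).foldl (pvStep (2 + (K : Int)))
            (pvFlat (2 + (K : Int)) ++ pvPart (2 + (K : Int)) 1) := by
          rw [hpart0, List.append_nil]
      _ = pvFlat (2 + (K : Int)) ++ pvPart (2 + (K : Int)) (2 + (K : Int)) :=
          pvInner _ h2 ((2 + (K : Int)) - 1).toNat 1 (by omega) (by omega) (by omega)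
      _ = pvFlat ((2 + (K : Int)) + 1) := hflat

lemma pvPart_nodup (d j : Int) : (pvPart d j).Nodup := by
  unfold pvPart
  exact ((PySem.List.nodup_pyRange_one 1 j).filter _).map
    (fun a b h => by simpa using h)

lemma pvFlat_nodup (d : Int) : (pvFlat d).Nodup := by
  have h : ∀ k : Nat, (pvFlat (2 + (k : Int))).Nodup := by
    intro k
    induction k with
    | zero => decide
    | succ k ih =>
      rw [show ((2 : Int) + ((k + 1 : Nat) : Int)) = (2 + (k : Int)) + 1 by push_cast; ring]
      unfold pvFlat
      rw [PySem.List.pyRange_one_succ_right (by omega : (2:Int) ≤ 2 + (k : Int)),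
        List.flatMap_append]
      simp only [List.flatMap_cons, List.flatMap_nil, List.append_nil]
      refine List.Nodup.append ih (pvPart_nodup _ _) ?_
      intro x hx hx'
      rcases pvFlat_mem.mp hx with ⟨a, b, _, _, hbd, _, rfl⟩
      rcases pvPart_mem.mp hx' with ⟨n, _, _, _, hx2⟩
      simp only [List.cons.injEq, and_true] at hx2
      omega
  by_cases hd : d ≤ 2
  · unfold pvFlat
    rw [PySem.List.pyRange_one_eq_nil (by omega)]
    exact List.nodup_nil
  · have := h (d - 2).toNat
    rwa [show (2 + (((d - 2).toNat : Nat) : Int)) = d by omega] at this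

lemma pvA_eq (N : Int) : generate_fractions N = pvFlat (N + 1) := by
  show (PySem.List.pyRange 2 (N + 1) 1).foldl
      (fun fractions d => (PySem.List.pyRange 1 d 1).foldl (pvStep d) fractions)
      PySem.Set.empty = pvFlat (N + 1)
  by_cases hN : N + 1 ≤ 2
  · rw [PySem.List.pyRange_one_eq_nil (by omega), List.foldl_nil]
    unfold pvFlat
    rw [PySem.List.pyRange_one_eq_nil (by omega)]
    rfl
  · have := pvMain (N + 1 - 2).toNat
    rwa [show (2 + (((N + 1 - 2).toNat : Nat) : Int)) = N + 1 by omega] at this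

lemma pvB_eq (N : Int) : generate_fractions_alt N = pvFlat (N + 1) := by
  show PySem.Set.ofList (pvFlat (N + 1)) = pvFlat (N + 1)
  exact PySem.Set.ofList_eq_self_of_nodup _ (pvFlat_nodup _)

-- ===== VERDICT (by name: the statement is the Claim_ definition above) =====
theorem generate_fractions_spec : Claim_equal_generate_fractions := by
  intro N _
  unfold Spec_generate_fractions
  rw [pvA_eq, pvB_eq]
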